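-- pv_equiv track=rewrite | github.com/clefever/aoc2020 | day06.py | parse_answers2
-- ===== SOURCE A (Python) =====
-- def parse_answers2(input):
--     docs = []
--     num = 0
--     doc = {}
--     for line in input:
--         if line == '':
--             docs.append((doc, num))
--             num = 0
--             doc = {}
--         else:
--             num += 1
--         for ans in line:
--             if ans not in doc.keys():
--                 doc[ans] = 1
--             else:
--                 doc[ans] += 1
--     docs.append((doc, num))
--     return docs
-- ===== SOURCE B (Python) =====
-- def _groups(lines):
--     # Build the groups back-to-front: scan the lines in reverse, starting a
--     # (new) empty group at each blank line and prepending other lines to the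
--     # current first group.  There is always one final (possibly empty) group.
--     gs = [[]]
--     for line in reversed(lines):
--         if line == '':
--             gs.insert(0, [])
--         else:
--             gs[0] = [line] + gs[0]
--     return gs
--
--
-- def _count(group):
--     d = {}
--     for line in group:
--         for ch in line:
--             d[ch] = d.get(ch, 0) + 1
--     return d
--
--
-- def parse_answers2(input):
--     return [(_count(g), len(g)) for g in _groups(input)]
-- ===== Notes on version B (the rewrite author's own statement) =====
-- stated objective: simpler
-- what changed: Replaces A's single forward pass with mutable flush-on-blank state (docs, num, doc) by two separate phases: a reverse scan that splits the lines into groups, then a map turning each group into (character-frequency dict, group length).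
import Mathlib
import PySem

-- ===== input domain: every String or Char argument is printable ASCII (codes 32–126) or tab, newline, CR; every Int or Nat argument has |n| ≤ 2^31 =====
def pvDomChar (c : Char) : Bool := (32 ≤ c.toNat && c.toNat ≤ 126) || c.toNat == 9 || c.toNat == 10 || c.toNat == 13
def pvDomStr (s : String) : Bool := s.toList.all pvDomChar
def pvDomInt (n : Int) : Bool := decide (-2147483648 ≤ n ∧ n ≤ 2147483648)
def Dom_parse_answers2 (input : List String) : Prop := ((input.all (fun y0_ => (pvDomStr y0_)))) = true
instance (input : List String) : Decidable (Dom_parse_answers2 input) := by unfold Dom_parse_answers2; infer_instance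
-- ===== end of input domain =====

-- B replaces A's single flush-on-blank pass by two phases (split into groups, then count each group); return values proved equal.

-- ===== PORT A =====
-- inner 'for ans in line' loop of A
def pvAInner (doc : PySem.Dict String Int) (line : String) : PySem.Dict String Int :=
  line.toList.foldl (fun d c =>
    let k := String.mk [c]
    if d.contains k = false then d.insert k 1 else d.modify k 0 (· + 1)) doc

-- one iteration of A's 'for line in input' loop on the state (docs, num, doc)
def pvAStep (st : (List ((List (String × Int)) × Int)) × Int × PySem.Dict String Int)
    (line : String) : (List ((List (String × Int)) × Int)) × Int × PySem.Dict String Int :=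
  let st' := if line = "" then (st.1 ++ [(st.2.2.items, st.2.1)], (0 : Int), (PySem.Dict.empty : PySem.Dict String Int))
             else (st.1, st.2.1 + 1, st.2.2)
  (st'.1, st'.2.1, pvAInner st'.2.2 line)

-- final 'docs.append((doc, num)); return docs'
def pvAFinish (st : (List ((List (String × Int)) × Int)) × Int × PySem.Dict String Int) :
    List ((List (String × Int)) × Int) :=
  st.1 ++ [(st.2.2.items, st.2.1)]

def parse_answers2 (input : List String) : List ((List (String × Int)) × Int) :=
  pvAFinish (input.foldl pvAStep ([], 0, PySem.Dict.empty))

-- ===== PORT B =====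
-- Source B's _groups: reverse scan, new empty group at each blank line, prepend otherwise
def pvGroupStep (line : String) (gs : List (List String)) : List (List String) :=
  if line = "" then [] :: gs else (line :: gs.headI) :: gs.tail

def pvGroups (lines : List String) : List (List String) :=
  lines.foldr pvGroupStep [[]]

-- Source B's _count inner loop over one line
def pvCountLine (d : PySem.Dict String Int) (line : String) : PySem.Dict String Int :=
  line.toList.foldl (fun d c =>
    let k := String.mk [c]
    d.insert k (d.getD k 0 + 1)) d

-- Source B's _count
def pvCount (g : List String) : PySem.Dict String Int :=
  g.foldl pvCountLine PySem.Dict.empty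

def parse_answers2_alt (input : List String) : List ((List (String × Int)) × Int) :=
  (pvGroups input).map (fun g => ((pvCount g).items, (g.length : Int)))

-- ===== PRECONDITION & SPEC =====
def Spec_parse_answers2 (input : List String) (out : List ((List (String × Int)) × Int)) : Prop := out = parse_answers2_alt input
instance (input : List String) (out : List ((List (String × Int)) × Int)) : Decidable (Spec_parse_answers2 input out) := by unfold Spec_parse_answers2; infer_instance

-- ===== CLAIM (what is proved, stated in full; the proofs are below) =====
def Claim_equal_parse_answers2 : Prop := ∀ (input : List String), Dom_parse_answers2 input → Spec_parse_answers2 input (parse_answers2 input)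

-- ===== LEMMAS AND PROOFS =====

-- A's char-counting step equals B's: 'if absent insert 1 else += 1' is 'insert (getD + 1)'
lemma pvInner_eq (doc : PySem.Dict String Int) (line : String) :
    pvAInner doc line = pvCountLine doc line := by
  unfold pvAInner pvCountLine
  congr 1
  funext d c
  by_cases h : d.contains (String.mk [c]) = false
  · norm_num [h, PySem.Dict.getD_of_not_contains]
  · simp only [h]
    rfl

lemma pvGroups_ne_nil (ls : List String) : pvGroups ls ≠ [] := by
  cases ls with
  | nil => simp [pvGroups]
  | cons l ls =>
    show pvGroupStep l (pvGroups ls) ≠ []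
    unfold pvGroupStep
    split_ifs <;> simp

lemma pvMain (ls : List String) : ∀ (docs : List ((List (String × Int)) × Int)) (num : Int)
    (doc : PySem.Dict String Int),
    pvAFinish (ls.foldl pvAStep (docs, num, doc)) =
      docs ++ ((((pvGroups ls).headI.foldl pvCountLine doc).items,
                 num + ((pvGroups ls).headI.length : Int)) ::
               (pvGroups ls).tail.map (fun g => ((pvCount g).items, (g.length : Int)))) := by
  induction ls with
  | nil =>
    intro docs num doc
    simp [pvGroups, pvAFinish]
  | cons l ls ih =>
    intro docs num doc
    obtain ⟨h, t, hg⟩ : ∃ h t, pvGroups ls = h :: t := by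
      cases hgs : pvGroups ls with
      | nil => exact absurd hgs (pvGroups_ne_nil ls)
      | cons h t => exact ⟨h, t, rfl⟩
    by_cases hl : l = ""
    · subst hl
      have hstep : pvAStep (docs, num, doc) "" = (docs ++ [(doc.items, num)], 0, PySem.Dict.empty) := by
        simp [pvAStep, pvAInner]
      have hgrp : pvGroups ("" :: ls) = [] :: pvGroups ls := by
        show pvGroupStep "" (pvGroups ls) = _
        simp [pvGroupStep]
      rw [List.foldl_cons, hstep, ih, hgrp, hg]
      simp [pvCount]
    · have hstep : pvAStep (docs, num, doc) l = (docs, num + 1, pvAInner doc l) := by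
        simp [pvAStep, hl]
      have hgrp : pvGroups (l :: ls) = (l :: h) :: t := by
        show pvGroupStep l (pvGroups ls) = _
        simp [pvGroupStep, hl, hg]
      rw [List.foldl_cons, hstep, ih, hgrp, hg]
      simp only [List.headI, List.tail, List.foldl_cons, pvInner_eq]
      congr 2
      simp only [Prod.mk.injEq, List.length_cons]
      exact ⟨trivial, by push_cast; ring⟩

-- ===== VERDICT (by name: the statement is the Claim_ definition above) =====
theorem parse_answers2_spec : Claim_equal_parse_answers2 := by
  intro input _
  show parse_answers2 input = parse_answers2_alt input
  obtain ⟨h, t, hg⟩ : ∃ h t, pvGroups input = h :: t := by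
    cases hgs : pvGroups input with
    | nil => exact absurd hgs (pvGroups_ne_nil input)
    | cons h t => exact ⟨h, t, rfl⟩
  unfold parse_answers2 parse_answers2_alt
  rw [pvMain input [] 0 PySem.Dict.empty, hg]
  simp [pvCount]
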